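-- pv_equiv track=rewrite | github.com/chorokdong/CodingTest | Programmers_Python/[Lv.1]프로그래머스_크레인_인형뽑기_게임.py | solution
-- ===== SOURCE A (Python) =====
-- def solution(board, moves):
--     ###### board 정렬을 위한 코드 ######
--     board.reverse() # 역순으로 뒤집고
--     new_board = [[] for i in range(len(board))] # 새로운 빈 리스트
--
--     ###### board 안에있는 0값을 지우고 쉽게 pop을 하기 위해 추가 ######
--     for i in board:
--         for j in range(len(i)):
--             if i[j] == 0:
--                 pass
--             else:
--                 new_board[j].append(i[j])
--
--     ####### moves의 값 만큼 new_board에서 pop을 진행 ######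
--     bucket = []
--     result = 0
--
--     for i in moves:
--         try:
--             toy = new_board[i-1].pop()
--             bucket.append(toy)
--         except :
--             pass
--
--         ####### 2개 이상이고 2개의 값을 비교했을 때 같으면 삭제 #######
--         if len(bucket) >= 2 and bucket[-1] == bucket[-2]:
--             bucket.pop()
--             bucket.pop()
--             result += 2
--
--     return result
-- ===== SOURCE B (Python) =====
-- # Lazy column scan instead of reversing the board and prebuilding column stacks.
-- # Note: the original reverses `board` in place; this version leaves its arguments untouched.
-- def solution(board, moves):
--     n = len(board)
--     depth = [0] * n                 # rows already consumed, per column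
--     bucket = []
--     result = 0
--     for m in moves:
--         if not 1 <= m <= n:
--             continue                # no such column: the move grabs nothing
--         c = m - 1
--         r = depth[c]
--         while r < n and (board[r][c] if c < len(board[r]) else 0) == 0:
--             r += 1
--         depth[c] = r
--         if r == n:
--             continue                # column exhausted
--         depth[c] = r + 1
--         bucket.append(board[r][c])
--         if len(bucket) >= 2 and bucket[-1] == bucket[-2]:
--             bucket.pop()
--             bucket.pop()
--             result += 2
--     return result
-- ===== Notes on version B (the rewrite author's own statement) =====
-- stated objective: simpler
-- what changed: B drops A's in-place board reversal and per-column stack construction: it keeps one consumed-depth pointer per column and, for each move naming a real column (1..n), scans that column top-down for the first non-zero cell, feeding picks into the same pair-matching bucket; Pre_ excludes boards with a nonzero cell at column index >= len(board), on which A raises an uncaught IndexError, and malformed moves in [1-len(board),0] whose wrapped column still holds a doll, where A's new_board[m-1] picks from the right-hand columns via Python negative indexing while B skips the invalid move.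
-- outside the precondition, e.g. on solution([[1, 2], [1, 2]], [0, 0]): A returns 2, B returns 0
import Mathlib
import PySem

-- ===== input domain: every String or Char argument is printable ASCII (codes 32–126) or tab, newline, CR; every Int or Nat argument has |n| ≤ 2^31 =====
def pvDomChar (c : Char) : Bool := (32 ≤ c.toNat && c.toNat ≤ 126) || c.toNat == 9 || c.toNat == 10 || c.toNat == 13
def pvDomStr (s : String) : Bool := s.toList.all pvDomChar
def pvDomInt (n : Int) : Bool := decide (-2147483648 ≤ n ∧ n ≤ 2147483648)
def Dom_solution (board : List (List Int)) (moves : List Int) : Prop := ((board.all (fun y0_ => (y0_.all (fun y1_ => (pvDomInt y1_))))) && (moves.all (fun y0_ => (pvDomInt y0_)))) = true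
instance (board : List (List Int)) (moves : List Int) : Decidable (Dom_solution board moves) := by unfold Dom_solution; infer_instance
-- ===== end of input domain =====

-- B replaces A's board reversal + column-stack build by per-column consumed-depth pointers scanned top-down
-- (objective: simpler, same cost). Python A also reverses `board` in place (caller-observable); B does not
-- mutate its arguments — the equivalence proved here is about the RETURN value only.

-- ===== PORT A =====
-- one row of the build loop: `for j in range(len(i)): if i[j] == 0: pass else: new_board[j].append(i[j])`
-- (`new_board[j]` raises IndexError for a nonzero cell at j ≥ len(new_board); excluded by Pre_, the port's
-- `List.set`/`getD` are total there)
def pvRowStepA (nb : List (List Int)) (row : List Int) : List (List Int) :=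
  (List.range row.length).foldl
    (fun acc j => if row.getD j 0 = 0 then acc
                  else acc.set j (acc.getD j [] ++ [row.getD j 0])) nb

-- one move: try/except pop-and-push, then the bucket pair check (run on every move, as in A)
def pvMoveStepA (st : List (List Int) × List Int × Int) (i : Int) : List (List Int) × List Int × Int :=
  let nb := st.1
  let bucket := st.2.1
  let result := st.2.2
  let nbBucket :=
    match PySem.List.pyGet? nb (i - 1) with
    | none => (nb, bucket)                    -- IndexError on new_board[i-1], caught by `except`
    | some col =>
      match PySem.List.pop? col with          -- col.pop(); none = pop from empty list, caught by `except`
      | none => (nb, bucket)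
      | some (toy, rest) => (PySem.List.pySetD nb (i - 1) rest, bucket ++ [toy])
  let nb' := nbBucket.1
  let bucket' := nbBucket.2
  -- `if len(bucket) >= 2 and bucket[-1] == bucket[-2]:` (pyGetD's default is never read: guarded by the length test)
  if 2 ≤ bucket'.length ∧ PySem.List.pyGetD bucket' (-1) 0 = PySem.List.pyGetD bucket' (-2) 0 then
    (nb', bucket'.dropLast.dropLast, result + 2)
  else (nb', bucket', result)

def solution (board : List (List Int)) (moves : List Int) : Int :=
  let newBoard := board.reverse.foldl pvRowStepA (List.replicate board.length ([] : List Int))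
  (moves.foldl pvMoveStepA (newBoard, ([] : List Int), (0 : Int))).2.2

-- ===== PORT B =====
-- `while r < n and (board[r][c] if c < len(board[r]) else 0) == 0: r += 1`
def pvScanB (board : List (List Int)) (n c : Nat) : Nat → Nat → Nat
  | 0, r => r
  | fuel + 1, r =>
    if r < n ∧ (if c < (board.getD r []).length then (board.getD r []).getD c 0 else 0) = 0 then
      pvScanB board n c fuel (r + 1)
    else r

def pvMoveStepB (board : List (List Int)) (n : Nat)
    (st : List Nat × List Int × Int) (m : Int) : List Nat × List Int × Int :=
  let ptr := st.1
  let bucket := st.2.1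
  let result := st.2.2
  if 1 ≤ m ∧ m ≤ (n : Int) then
    let c : Nat := (m - 1).toNat
    let r := pvScanB board n c n (ptr.getD c 0)   -- fuel n bounds the ≤ n loop iterations
    if r < n then
      let bucket' := bucket ++ [(board.getD r []).getD c 0]
      let ptr' := ptr.set c (r + 1)
      if 2 ≤ bucket'.length ∧ PySem.List.pyGetD bucket' (-1) 0 = PySem.List.pyGetD bucket' (-2) 0 then
        (ptr', bucket'.dropLast.dropLast, result + 2)
      else (ptr', bucket', result)
    else (ptr.set c r, bucket, result)       -- column exhausted: remember and skip
  else st                                     -- no such column: the move grabs nothing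

def solution_alt (board : List (List Int)) (moves : List Int) : Int :=
  let n := board.length
  (moves.foldl (pvMoveStepB board n) (List.replicate n (0 : Nat), ([] : List Int), (0 : Int))).2.2

-- ===== PRECONDITION & SPEC =====
-- Pre_ restricts inputs to the game's natural domain: it excludes boards with a NONZERO cell at a column
-- index ≥ len(board) (A raises an uncaught IndexError there), and malformed moves in [1-len(board), 0]
-- whose wrapped column n+m-1 still holds a doll — there A's `new_board[i-1]` picks it through Python's
-- negative indexing while B skips the invalid move. All other moves outside 1..n stay inside: both skip.
def Pre_solution (board : List (List Int)) (moves : List Int) : Prop :=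
  (board.all (fun row => (row.drop board.length).all (· == 0)) = true) ∧
  ∀ m ∈ moves, 1 - (board.length : Int) ≤ m → m ≤ 0 →
    ∀ row ∈ board, row.getD (m - 1 + (board.length : Int)).toNat 0 = 0
instance (board : List (List Int)) (moves : List Int) : Decidable (Pre_solution board moves) := by
  unfold Pre_solution; infer_instance

def pvWitness_solution : List (List Int) × List Int :=
  ([[0, 0, 0, 0, 0], [0, 0, 1, 0, 3], [0, 2, 5, 0, 1], [4, 2, 4, 4, 2], [3, 5, 1, 3, 1]],
   [1, 5, 3, 5, 1, 2, 1, 4])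

def Spec_solution (board : List (List Int)) (moves : List Int) (out : Int) : Prop := out = solution_alt board moves
instance (board : List (List Int)) (moves : List Int) (out : Int) : Decidable (Spec_solution board moves out) := by unfold Spec_solution; infer_instance

-- ===== CLAIM (what is proved, stated in full; the proofs are below) =====
def Claim_equal_solution : Prop := ∀ (board : List (List Int)) (moves : List Int), Dom_solution board moves → Pre_solution board moves → Spec_solution board moves (solution board moves)

-- ===== LEMMAS AND PROOFS =====

-- the (top-down) list of nonzero cells of column c
def pvCol (rows : List (List Int)) (c : Nat) : List Int :=
  rows.filterMap (fun row => if row.getD c 0 = 0 then none else some (row.getD c 0))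

lemma pvRowStepA_length (nb : List (List Int)) (row : List Int) :
    (pvRowStepA nb row).length = nb.length := by
  unfold pvRowStepA
  generalize List.range row.length = l
  induction l generalizing nb with
  | nil => rfl
  | cons j l ih =>
    simp only [List.foldl_cons]
    rw [ih]
    split <;> simp

lemma pvFoldSet_length (row : List Int) (l : List Nat) (nb : List (List Int)) :
    (l.foldl (fun acc j => if row.getD j 0 = 0 then acc
                           else acc.set j (acc.getD j [] ++ [row.getD j 0])) nb).length = nb.length := by
  induction l generalizing nb with
  | nil => rfl
  | cons k l ih =>
    rw [List.foldl_cons, ih]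
    split <;> simp

lemma pvRowStepA_getD_aux (nb : List (List Int)) (row : List Int) (j : Nat) (hj : j < nb.length) :
    ∀ L, ((List.range L).foldl
        (fun acc j => if row.getD j 0 = 0 then acc
                      else acc.set j (acc.getD j [] ++ [row.getD j 0])) nb).getD j [] =
      nb.getD j [] ++ (if j < L ∧ row.getD j 0 ≠ 0 then [row.getD j 0] else []) := by
  intro L
  induction L with
  | zero => simp
  | succ L ih =>
    rw [List.range_succ, List.foldl_append, List.foldl_cons, List.foldl_nil]
    set acc := (List.range L).foldl
        (fun acc j => if row.getD j 0 = 0 then acc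
                      else acc.set j (acc.getD j [] ++ [row.getD j 0])) nb with hacc
    have hlen : acc.length = nb.length := pvFoldSet_length row _ nb
    by_cases hz : row.getD L 0 = 0
    · rw [if_pos hz, ih]
      by_cases hjL : j = L
      · subst hjL
        rw [if_neg (fun h => h.2 hz), if_neg (fun h => h.2 hz)]
      · have heq : (j < L + 1 ∧ row.getD j 0 ≠ 0) ↔ (j < L ∧ row.getD j 0 ≠ 0) := by
          constructor <;> rintro ⟨h1, h2⟩ <;> exact ⟨by omega, h2⟩
        rw [if_congr heq rfl rfl]
    · rw [if_neg hz]
      by_cases hjL : j = L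
      · subst hjL
        rw [List.getD_eq_getElem?_getD, List.getElem?_set_self (by omega), Option.getD_some, ih, if_neg (fun h => absurd rfl (Nat.ne_of_lt h.1)),
          if_pos ⟨Nat.lt_succ_self j, hz⟩, List.append_nil]
      · rw [List.getD_eq_getElem?_getD, List.getElem?_set_ne (fun h => hjL h.symm),
          ← List.getD_eq_getElem?_getD, ih]
        have heq : (j < L + 1 ∧ row.getD j 0 ≠ 0) ↔ (j < L ∧ row.getD j 0 ≠ 0) := by
          constructor <;> rintro ⟨h1, h2⟩ <;> exact ⟨by omega, h2⟩
        rw [if_congr heq rfl rfl]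

lemma pvRowStepA_getD (nb : List (List Int)) (row : List Int) (j : Nat) (hj : j < nb.length) :
    (pvRowStepA nb row).getD j [] =
      nb.getD j [] ++ (if row.getD j 0 = 0 then [] else [row.getD j 0]) := by
  unfold pvRowStepA
  rw [pvRowStepA_getD_aux nb row j hj row.length]
  by_cases hz : row.getD j 0 = 0
  · rw [if_neg (fun h => h.2 hz), if_pos hz]
  · have hjr : j < row.length := by
      by_contra hc
      exact hz (List.getD_eq_default _ _ (by omega))
    rw [if_pos ⟨hjr, hz⟩, if_neg hz]

lemma pvBuild_getD (rows : List (List Int)) (nb : List (List Int)) (j : Nat) (hj : j < nb.length) :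
    (rows.foldl pvRowStepA nb).getD j [] = nb.getD j [] ++ pvCol rows j := by
  induction rows generalizing nb with
  | nil => simp [pvCol]
  | cons row rows ih =>
    rw [List.foldl_cons, ih _ (by rw [pvRowStepA_length]; exact hj), pvRowStepA_getD nb row j hj,
      List.append_assoc]
    congr 1
    simp only [pvCol, List.filterMap_cons]
    split <;> simp_all

lemma pvBuild_length (rows : List (List Int)) (nb : List (List Int)) :
    (rows.foldl pvRowStepA nb).length = nb.length := by
  induction rows generalizing nb with
  | nil => rfl
  | cons row rows ih => rw [List.foldl_cons, ih, pvRowStepA_length]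

-- the ragged-row cell read of Source B equals a defaulted lookup
lemma pvCell_eq (row : List Int) (c : Nat) :
    (if c < row.length then row.getD c 0 else 0) = row.getD c 0 := by
  split
  · rfl
  · rw [List.getD_eq_default _ _ (by omega)]

lemma pvScanB_spec (board : List (List Int)) (c : Nat) :
    ∀ fuel r, board.length - r ≤ fuel → r ≤ board.length →
      (pvCol (board.drop r) c = [] ∧ pvScanB board board.length c fuel r = board.length) ∨
      (∃ t, r ≤ pvScanB board board.length c fuel r ∧ pvScanB board board.length c fuel r < board.length ∧
        pvCol (board.drop r) c =
          (board.getD (pvScanB board board.length c fuel r) []).getD c 0 :: t ∧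
        pvCol (board.drop (pvScanB board board.length c fuel r + 1)) c = t) := by
  intro fuel
  induction fuel with
  | zero =>
    intro r h1 h2
    have hr : r = board.length := by omega
    subst hr
    left
    exact ⟨by simp [pvCol], rfl⟩
  | succ fuel ih =>
    intro r h1 h2
    by_cases hr : r < board.length
    · have hdrop : board.drop r = board[r] :: board.drop (r + 1) := List.drop_eq_getElem_cons hr
      have hgetD : board.getD r [] = board[r] := List.getD_eq_getElem _ _ hr
      by_cases hz : board[r].getD c 0 = 0
      · have hcond : r < board.length ∧
            (if c < (board.getD r []).length then (board.getD r []).getD c 0 else 0) = 0 :=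
          ⟨hr, by rw [pvCell_eq, hgetD]; exact hz⟩
        rw [pvScanB, if_pos hcond]
        have hcol : pvCol (board.drop r) c = pvCol (board.drop (r + 1)) c := by
          rw [hdrop]
          unfold pvCol
          exact List.filterMap_cons_none (by rw [if_pos hz])
        rcases ih (r + 1) (by omega) (by omega) with ⟨he, hs⟩ | ⟨t, ht1, ht2, ht3, ht4⟩
        · exact Or.inl ⟨by rw [hcol]; exact he, hs⟩
        · exact Or.inr ⟨t, by omega, ht2, by rw [hcol]; exact ht3, ht4⟩
      · have hcond : ¬(r < board.length ∧
            (if c < (board.getD r []).length then (board.getD r []).getD c 0 else 0) = 0) := by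
          rintro ⟨-, h⟩
          rw [pvCell_eq, hgetD] at h
          exact hz h
        rw [pvScanB, if_neg hcond]
        refine Or.inr ⟨pvCol (board.drop (r + 1)) c, le_refl r, hr, ?_, rfl⟩
        rw [hdrop]
        unfold pvCol
        rw [List.filterMap_cons_some (by rw [if_neg hz]), hgetD]
    · have hr' : r = board.length := by omega
      subst hr'
      rw [pvScanB, if_neg (by rintro ⟨h, -⟩; omega)]
      exact Or.inl ⟨by simp [pvCol], rfl⟩

lemma pvPyGet_char (xs : List (List Int)) (k : Int) (h1 : 0 ≤ k) (h2 : k < (xs.length : Int)) :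
    PySem.List.pyGet? xs k = some (xs.getD k.toNat []) := by
  simp only [PySem.List.pyGet?, PySem.List.pyIdx?]
  rw [if_pos h1, if_pos h2, Option.bind_some]
  have hk : k.toNat < xs.length := by omega
  rw [List.getElem?_eq_getElem hk, List.getD_eq_getElem _ _ hk]

lemma pvPyGet_neg (xs : List (List Int)) (k : Int) (h1 : -(xs.length : Int) ≤ k) (h2 : k < 0) :
    PySem.List.pyGet? xs k = some (xs.getD (k + xs.length).toNat []) := by
  simp only [PySem.List.pyGet?, PySem.List.pyIdx?]
  rw [if_neg (by omega), if_pos h1, Option.bind_some]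
  have hk : (k + (xs.length : Int)).toNat < xs.length := by omega
  have hidx : xs.length - (-k).toNat = (k + (xs.length : Int)).toNat := by omega
  rw [hidx, List.getElem?_eq_getElem hk, List.getD_eq_getElem _ _ hk]

-- a column that is zero in every row collects no dolls
lemma pvCol_nil (l board : List (List Int)) (j : Nat) (hsub : ∀ row ∈ l, row ∈ board)
    (hz : ∀ row ∈ board, row.getD j 0 = 0) : pvCol l j = [] := by
  unfold pvCol
  rw [List.filterMap_eq_nil_iff]
  intro row hrow
  rw [if_pos (hz row (hsub row hrow))]

lemma pvPyGet_none (xs : List (List Int)) (k : Int) (h : ¬(-(xs.length : Int) ≤ k ∧ k < (xs.length : Int))) :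
    PySem.List.pyGet? xs k = none := by
  simp only [PySem.List.pyGet?, PySem.List.pyIdx?]
  by_cases h0 : 0 ≤ k
  · rw [if_pos h0, if_neg (by omega)]
    rfl
  · rw [if_neg h0, if_neg (by omega)]
    rfl

lemma pvPySetD_char (xs : List (List Int)) (k : Int) (v : List Int)
    (h1 : 0 ≤ k) (h2 : k < (xs.length : Int)) :
    PySem.List.pySetD xs k v = xs.set k.toNat v := by
  simp only [PySem.List.pySetD, PySem.List.pySet?, PySem.List.pyIdx?]
  rw [if_pos h1, if_pos h2, Option.map_some, Option.getD_some]

lemma pvGetD_penult (ys : List Int) (a b : Int) :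
    PySem.List.pyGetD (ys ++ [a, b]) (-2) 0 = a := by
  have hlen : (ys ++ [a, b]).length = ys.length + 2 := by simp
  rw [PySem.List.pyGetD_neg_ofNat (ys ++ [a, b]) 2 0 (by omega) (by omega)]
  simp [hlen]

lemma pvGetD_last (ys : List Int) (a b : Int) :
    PySem.List.pyGetD (ys ++ [a, b]) (-1) 0 = b := by
  have hsplit : ys ++ [a, b] = (ys ++ [a]) ++ [b] := by simp
  rw [hsplit, PySem.List.pyGetD_neg_one_append_singleton]

-- the bucket check does nothing on a bucket with no equal adjacent pair
lemma pvCheck_skip (bucket : List Int) (h : List.IsChain (· ≠ ·) bucket) :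
    ¬(2 ≤ bucket.length ∧ PySem.List.pyGetD bucket (-1) 0 = PySem.List.pyGetD bucket (-2) 0) := by
  rintro ⟨hlen, heq⟩
  rcases bucket.eq_nil_or_concat with rfl | ⟨l', b, rfl⟩
  · simp at hlen
  rcases l'.eq_nil_or_concat with rfl | ⟨ys, a, rfl⟩
  · simp at hlen
  simp only [List.concat_eq_append, List.append_assoc, List.cons_append, List.nil_append] at h heq ⊢
  rw [pvGetD_penult, pvGetD_last] at heq
  have hsplit : ys ++ [a, b] = (ys ++ [a]) ++ [b] := by simp
  rw [hsplit, List.isChain_append] at h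
  exact (h.2.2 a (by simp) b (by simp)) heq.symm

lemma pvChain_push (bucket : List Int) (t : Int) (h : List.IsChain (· ≠ ·) bucket) :
    List.IsChain (· ≠ ·)
      (if 2 ≤ (bucket ++ [t]).length ∧
          PySem.List.pyGetD (bucket ++ [t]) (-1) 0 = PySem.List.pyGetD (bucket ++ [t]) (-2) 0 then
        (bucket ++ [t]).dropLast.dropLast else bucket ++ [t]) := by
  rcases bucket.eq_nil_or_concat with rfl | ⟨ys, a, rfl⟩
  · rw [if_neg (by simp)]
    simp
  simp only [List.concat_eq_append] at h ⊢
  have hsplit : (ys ++ [a]) ++ [t] = ys ++ [a, t] := by simp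
  have hchainYs : List.IsChain (· ≠ ·) ys := (List.isChain_append.mp h).1
  by_cases hat : a = t
  · rw [if_pos ⟨by simp, by rw [hsplit, pvGetD_last, pvGetD_penult, hat]⟩]
    rw [List.dropLast_concat, List.dropLast_concat]
    exact hchainYs
  · rw [if_neg (by
      rintro ⟨-, hv⟩
      rw [hsplit, pvGetD_last, pvGetD_penult] at hv
      exact hat hv.symm)]
    rw [List.isChain_append]
    refine ⟨h, by simp, ?_⟩
    rintro x hx y hy
    simp only [List.getLast?_concat, Option.mem_def, Option.some.injEq] at hx
    simp only [List.head?_cons, Option.mem_def, Option.some.injEq] at hy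
    subst hx
    subst hy
    exact hat

lemma pvGetD_set_self {α : Type} (l : List α) (i : Nat) (v d : α) (h : i < l.length) :
    (l.set i v).getD i d = v := by
  rw [List.getD_eq_getElem?_getD, List.getElem?_set_self h, Option.getD_some]

lemma pvGetD_set_ne {α : Type} (l : List α) (i j : Nat) (v d : α) (h : i ≠ j) :
    (l.set i v).getD j d = l.getD j d := by
  rw [List.getD_eq_getElem?_getD, List.getElem?_set_ne h, ← List.getD_eq_getElem?_getD]

def pvInv (board nb : List (List Int)) (ptr : List Nat) (bucket : List Int) : Prop :=
  nb.length = board.length ∧ ptr.length = board.length ∧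
  (∀ j, j < board.length →
    ptr.getD j 0 ≤ board.length ∧
    nb.getD j [] = (pvCol (board.drop (ptr.getD j 0)) j).reverse) ∧
  List.IsChain (· ≠ ·) bucket

lemma pvStep_eq (board nb : List (List Int)) (ptr : List Nat) (bucket : List Int) (res m : Int)
    (hm : 1 - (board.length : Int) ≤ m → m ≤ 0 →
      ∀ row ∈ board, row.getD (m - 1 + (board.length : Int)).toNat 0 = 0)
    (h : pvInv board nb ptr bucket) :
    (pvMoveStepA (nb, bucket, res) m).2 = (pvMoveStepB board board.length (ptr, bucket, res) m).2 ∧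
    pvInv board (pvMoveStepA (nb, bucket, res) m).1 (pvMoveStepB board board.length (ptr, bucket, res) m).1
      (pvMoveStepA (nb, bucket, res) m).2.1 := by
  obtain ⟨hnb, hptr, hcols, hchain⟩ := h
  by_cases hin : 1 ≤ m ∧ m ≤ (board.length : Int)
  · -- the move names a real column
    simp only [pvMoveStepA, pvMoveStepB, if_pos hin]
    set jN : Nat := (m - 1).toNat with hjN
    have hjn : jN < board.length := by omega
    have hA := pvPyGet_char nb (m - 1) (by omega) (by rw [hnb]; omega)
    rw [← hjN] at hA
    simp only [hA]
    obtain ⟨hple, hcol⟩ := hcols jN hjn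
    rcases pvScanB_spec board jN board.length (ptr.getD jN 0) (by omega) hple with
      ⟨hempty, hrn⟩ | ⟨t, hr1, hr2, hr3, hr4⟩
    · -- empty column: A pops nothing, B's scan runs off the board
      have hcolnil : nb.getD jN [] = [] := by rw [hcol, hempty, List.reverse_nil]
      have hpop : PySem.List.pop? ([] : List Int) = none := rfl
      simp only [hcolnil, hpop]
      rw [if_neg (pvCheck_skip bucket hchain), if_neg (by rw [hrn]; exact lt_irrefl _)]
      refine ⟨by trivial, hnb, by simp [hptr], ?_, hchain⟩
      intro j hj
      by_cases hjj : j = jN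
      · subst hjj
        rw [pvGetD_set_self _ _ _ _ (by omega), hrn]
        exact ⟨le_refl _, by rw [List.drop_length, hcolnil]; rfl⟩
      · rw [pvGetD_set_ne _ _ _ _ _ (fun hc => hjj hc.symm)]
        exact hcols j hj
    · -- a doll is found: both pick the same toy and consume the same cell
      have hcolview : nb.getD jN [] = t.reverse ++
          [(board.getD (pvScanB board board.length jN board.length (ptr.getD jN 0)) []).getD jN 0] := by
        rw [hcol, hr3, List.reverse_cons]
      have hpop : PySem.List.pop? (nb.getD jN []) = some
          ((board.getD (pvScanB board board.length jN board.length (ptr.getD jN 0)) []).getD jN 0,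
           t.reverse) := by
        rw [hcolview]
        exact PySem.List.pop?_last _ _
      simp only [hpop]
      have hset : PySem.List.pySetD nb (m - 1) t.reverse = nb.set jN t.reverse := by
        rw [pvPySetD_char nb (m - 1) t.reverse (by omega) (by rw [hnb]; omega)]
      rw [hset, if_pos hr2]
      have hchain' := pvChain_push bucket
        ((board.getD (pvScanB board board.length jN board.length (ptr.getD jN 0)) []).getD jN 0) hchain
      by_cases hchk : 2 ≤ (bucket ++
          [(board.getD (pvScanB board board.length jN board.length (ptr.getD jN 0)) []).getD jN 0]).length ∧
          PySem.List.pyGetD (bucket ++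
            [(board.getD (pvScanB board board.length jN board.length (ptr.getD jN 0)) []).getD jN 0]) (-1) 0 =
          PySem.List.pyGetD (bucket ++
            [(board.getD (pvScanB board board.length jN board.length (ptr.getD jN 0)) []).getD jN 0]) (-2) 0
      · rw [if_pos hchk] at hchain'
        simp only [if_pos hchk]
        refine ⟨by trivial, by simp [hnb], by simp [hptr], ?_, hchain'⟩
        intro j hj
        by_cases hjj : j = jN
        · subst hjj
          rw [pvGetD_set_self _ _ _ _ (by omega), pvGetD_set_self _ _ _ _ (by omega), hr4]
          exact ⟨by omega, rfl⟩
        · rw [pvGetD_set_ne _ _ _ _ _ (fun hc => hjj hc.symm),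
            pvGetD_set_ne _ _ _ _ _ (fun hc => hjj hc.symm)]
          exact hcols j hj
      · rw [if_neg hchk] at hchain'
        simp only [if_neg hchk]
        refine ⟨by trivial, by simp [hnb], by simp [hptr], ?_, hchain'⟩
        intro j hj
        by_cases hjj : j = jN
        · subst hjj
          rw [pvGetD_set_self _ _ _ _ (by omega), pvGetD_set_self _ _ _ _ (by omega), hr4]
          exact ⟨by omega, rfl⟩
        · rw [pvGetD_set_ne _ _ _ _ _ (fun hc => hjj hc.symm),
            pvGetD_set_ne _ _ _ _ _ (fun hc => hjj hc.symm)]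
          exact hcols j hj
  · by_cases hwrap : 1 - (board.length : Int) ≤ m ∧ m ≤ 0
    · -- malformed wrap move: A indexes the right-hand column, but by Pre_ it holds no doll — pop fails
      have hA := pvPyGet_neg nb (m - 1) (by rw [hnb]; omega) (by omega)
      rw [hnb] at hA
      set jW : Nat := (m - 1 + (board.length : Int)).toNat with hjW
      have hjn : jW < board.length := by omega
      obtain ⟨hple, hcol⟩ := hcols jW hjn
      have hnil : nb.getD jW [] = [] := by
        rw [hcol, pvCol_nil (board.drop (ptr.getD jW 0)) board jW
          (fun row hrow => List.mem_of_mem_drop hrow) (hm hwrap.1 hwrap.2), List.reverse_nil]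
      have hpop : PySem.List.pop? ([] : List Int) = none := rfl
      simp only [pvMoveStepA, pvMoveStepB, if_neg hin, hA, hnil, hpop]
      rw [if_neg (pvCheck_skip bucket hchain)]
      exact ⟨rfl, hnb, hptr, hcols, hchain⟩
    · -- far out of range: A's except-pass and B's range test both skip
      have hA : PySem.List.pyGet? nb (m - 1) = none :=
        pvPyGet_none nb (m - 1) (by rw [hnb]; omega)
      simp only [pvMoveStepA, pvMoveStepB, if_neg hin, hA]
      rw [if_neg (pvCheck_skip bucket hchain)]
      exact ⟨rfl, hnb, hptr, hcols, hchain⟩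

lemma pvLoop_eq (board : List (List Int)) :
    ∀ (moves : List Int) (nb : List (List Int)) (ptr : List Nat) (bucket : List Int) (res : Int),
      (∀ m ∈ moves, 1 - (board.length : Int) ≤ m → m ≤ 0 →
        ∀ row ∈ board, row.getD (m - 1 + (board.length : Int)).toNat 0 = 0) →
      pvInv board nb ptr bucket →
      (moves.foldl pvMoveStepA (nb, bucket, res)).2.2 =
      (moves.foldl (pvMoveStepB board board.length) (ptr, bucket, res)).2.2 := by
  intro moves
  induction moves with
  | nil => intro nb ptr bucket res _ _; rfl
  | cons m ms ih =>
    intro nb ptr bucket res hms hInv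
    obtain ⟨h2, hInv'⟩ := pvStep_eq board nb ptr bucket res m (hms m (List.mem_cons_self)) hInv
    rw [List.foldl_cons, List.foldl_cons]
    have key := ih (pvMoveStepA (nb, bucket, res) m).1
      (pvMoveStepB board board.length (ptr, bucket, res) m).1
      (pvMoveStepA (nb, bucket, res) m).2.1 (pvMoveStepA (nb, bucket, res) m).2.2
      (fun x hx => hms x (List.mem_cons_of_mem m hx)) hInv'
    have e1 : ((pvMoveStepA (nb, bucket, res) m).1, (pvMoveStepA (nb, bucket, res) m).2.1,
        (pvMoveStepA (nb, bucket, res) m).2.2) = pvMoveStepA (nb, bucket, res) m := rfl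
    have e2 : ((pvMoveStepB board board.length (ptr, bucket, res) m).1,
        (pvMoveStepA (nb, bucket, res) m).2.1, (pvMoveStepA (nb, bucket, res) m).2.2) =
        pvMoveStepB board board.length (ptr, bucket, res) m := by
      rw [h2]
    rw [e1, e2] at key
    exact key

-- ===== VERDICT (by name: the statement is the Claim_ definition above) =====
theorem solution_spec : Claim_equal_solution := by
  intro board moves _ hpre
  unfold Spec_solution solution solution_alt
  simp only
  apply pvLoop_eq board moves _ _ _ _ hpre.2
  refine ⟨by rw [pvBuild_length]; simp, by simp, ?_, List.isChain_nil⟩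
  intro j hj
  have hjr : j < (List.replicate board.length ([] : List Int)).length := by simpa using hj
  have hptr0 : (List.replicate board.length (0 : Nat)).getD j 0 = 0 := List.getD_replicate _ hj
  rw [hptr0]
  refine ⟨Nat.zero_le _, ?_⟩
  rw [pvBuild_getD board.reverse _ j hjr, List.getD_replicate _ hj, List.nil_append,
    List.drop_zero]
  unfold pvCol
  exact List.filterMap_reverse
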